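-- pv_equiv track=rewrite | github.com/AnselBlume/partonomy | src/models/PLUM/utils/metrics.py | is_subsequence_in_window
-- ===== SOURCE A (Python) =====
-- def is_subsequence_in_window(window_tokens: list, gt_tokens: list) -> bool:
--     '''
--     Checks if the ground-truth token sequence, 'gt_tokens', appears as a contiguous subsequence in the list window_tokens.
--     '''
--
--     n = len(window_tokens)
--     m = len(gt_tokens)
--     if m == 0 or m > n:
--         return False
--
--     for i in range(n - m + 1):
--         if window_tokens[i:i + m] == gt_tokens:
--             return True
--     return False
-- ===== SOURCE B (Python) =====
-- def is_subsequence_in_window(window_tokens: list, gt_tokens: list) -> bool: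
--     '''
--     Single left-to-right pass over window_tokens maintaining the set of lengths
--     of prefixes of gt_tokens that match a suffix of the tokens seen so far
--     (an NFA-style simulation); no slicing, no restart from each start index.
--     '''
--     m = len(gt_tokens)
--     if m == 0:
--         return False
--     active = set()  # lengths k (1 <= k < m): gt_tokens[:k] matches the last k tokens seen
--     for t in window_tokens:
--         new_active = set()
--         for k in active:
--             if k < m and gt_tokens[k] == t:
--                 new_active.add(k + 1)
--         if gt_tokens[0] == t:
--             new_active.add(1)
--         if m in new_active:
--             return True
--         active = new_active
--     return False
-- ===== Notes on version B (the rewrite author's own statement) =====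
-- stated objective: alternative
-- what changed: Replaces the restart-at-every-index slice comparison with a single left-to-right pass that maintains the set of prefix lengths of gt_tokens currently matching a suffix of the scanned window (NFA-style simulation), with no slicing.
import Mathlib
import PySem

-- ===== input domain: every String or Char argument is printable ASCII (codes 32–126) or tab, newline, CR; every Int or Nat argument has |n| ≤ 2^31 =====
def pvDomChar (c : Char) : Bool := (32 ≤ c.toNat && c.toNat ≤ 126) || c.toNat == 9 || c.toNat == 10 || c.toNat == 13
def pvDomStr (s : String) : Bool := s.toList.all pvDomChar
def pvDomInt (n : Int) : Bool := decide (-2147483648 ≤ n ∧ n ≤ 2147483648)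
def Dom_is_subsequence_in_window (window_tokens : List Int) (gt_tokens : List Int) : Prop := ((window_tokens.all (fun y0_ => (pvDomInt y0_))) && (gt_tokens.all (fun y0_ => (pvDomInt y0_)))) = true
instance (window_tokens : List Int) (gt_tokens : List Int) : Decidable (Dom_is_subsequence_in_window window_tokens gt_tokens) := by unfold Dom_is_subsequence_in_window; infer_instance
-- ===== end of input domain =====

-- B replaces A's restart-at-every-start-index slice comparison by a single left-to-right
-- pass maintaining the set of currently matched prefix lengths of gt_tokens (alternative algorithm).

-- ===== PORT A =====
def is_subsequence_in_window (window_tokens : List Int) (gt_tokens : List Int) : Bool :=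
  -- n = len(window_tokens); m = len(gt_tokens); if m == 0 or m > n: return False
  if (gt_tokens.length : Int) = 0 ∨ (gt_tokens.length : Int) > (window_tokens.length : Int) then false
  else
    -- 'for i in range(n - m + 1): if window_tokens[i:i+m] == gt_tokens: return True' then 'return False'
    (PySem.List.pyRange 0 ((window_tokens.length : Int) - (gt_tokens.length : Int) + 1) 1).any
      (fun i => PySem.List.slice window_tokens (some i) (some (i + (gt_tokens.length : Int))) == gt_tokens)

-- ===== PORT B =====
-- inner 'for k in active' loop of Source B: the filtered-and-shifted new_active
-- (building a set from a set's elements is order-insensitive, so the foldl is exact)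
def pvFold (gt_tokens : List Int) (m : Int) (active : PySem.Set Int) (t : Int) : PySem.Set Int :=
  active.foldl
    (fun s k => if decide (k < m) && (PySem.List.pyGet? gt_tokens k == some t)
                then PySem.Set.add s (k + 1) else s)
    PySem.Set.empty

-- '... ; if gt_tokens[0] == t: new_active.add(1)'  (gt_tokens[0] exists: m ≥ 1 guard)
def pvBStep (gt_tokens : List Int) (m : Int) (active : PySem.Set Int) (t : Int) : PySem.Set Int :=
  if PySem.List.pyGet? gt_tokens 0 == some t then PySem.Set.add (pvFold gt_tokens m active t) 1
  else pvFold gt_tokens m active t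

-- the 'for t in window_tokens' loop with its early 'return True' when m is reached
def pvBLoop (gt_tokens : List Int) (m : Int) (active : PySem.Set Int) : List Int → Bool
  | [] => false
  | t :: rest =>
    if PySem.Set.contains (pvBStep gt_tokens m active t) m then true
    else pvBLoop gt_tokens m (pvBStep gt_tokens m active t) rest

def is_subsequence_in_window_alt (window_tokens : List Int) (gt_tokens : List Int) : Bool :=
  if ((gt_tokens.length : Int) == 0) then false
  else pvBLoop gt_tokens (gt_tokens.length : Int) PySem.Set.empty window_tokens

-- ===== PRECONDITION & SPEC =====
def Spec_is_subsequence_in_window (window_tokens : List Int) (gt_tokens : List Int) (out : Bool) : Prop := out = is_subsequence_in_window_alt window_tokens gt_tokens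
instance (window_tokens : List Int) (gt_tokens : List Int) (out : Bool) : Decidable (Spec_is_subsequence_in_window window_tokens gt_tokens out) := by unfold Spec_is_subsequence_in_window; infer_instance

-- ===== CLAIM (what is proved, stated in full; the proofs are below) =====
def Claim_equal_is_subsequence_in_window : Prop := ∀ (window_tokens : List Int) (gt_tokens : List Int), Dom_is_subsequence_in_window window_tokens gt_tokens → Spec_is_subsequence_in_window window_tokens gt_tokens (is_subsequence_in_window window_tokens gt_tokens)

-- ===== LEMMAS AND PROOFS =====

-- invariant meaning of k ∈ active: gt.take k (1 ≤ k ≤ |gt|) is a suffix of the processed part p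
def pvP (gt p : List Int) (k : Int) : Prop :=
  ∃ kn : Nat, k = (kn : Int) ∧ 1 ≤ kn ∧ kn ≤ gt.length ∧ gt.take kn <:+ p

theorem pv_mem_foldl_add (c : Int → Bool) (active : List Int) (s : List Int) (k : Int) :
    k ∈ active.foldl (fun s k' => if c k' then PySem.Set.add s (k' + 1) else s) s ↔
      k ∈ s ∨ ∃ k' ∈ active, c k' = true ∧ k = k' + 1 := by
  induction active generalizing s with
  | nil => simp
  | cons a as ih =>
    simp only [List.foldl_cons, List.mem_cons]
    by_cases h : c a = true
    · rw [if_pos h, ih]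
      simp only [PySem.Set.mem_add]
      constructor
      · rintro ((hs | rfl) | ⟨k', hk', hc, rfl⟩)
        · exact Or.inl hs
        · exact Or.inr ⟨a, Or.inl rfl, h, rfl⟩
        · exact Or.inr ⟨k', Or.inr hk', hc, rfl⟩
      · rintro (hs | ⟨k', rfl | hk', hc, rfl⟩)
        · exact Or.inl (Or.inl hs)
        · exact Or.inl (Or.inr rfl)
        · exact Or.inr ⟨k', hk', hc, rfl⟩
    · rw [if_neg h, ih]
      constructor
      · rintro (hs | ⟨k', hk', hc, rfl⟩)
        · exact Or.inl hs
        · exact Or.inr ⟨k', Or.inr hk', hc, rfl⟩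
      · rintro (hs | ⟨k', rfl | hk', hc, rfl⟩)
        · exact Or.inl hs
        · exact absurd hc h
        · exact Or.inr ⟨k', hk', hc, rfl⟩

theorem pv_suffix_concat {α : Type} (l p : List α) (x t : α) :
    l ++ [x] <:+ p ++ [t] ↔ l <:+ p ∧ x = t := by
  constructor
  · intro h
    have h' := List.reverse_prefix.mpr h
    simp only [List.reverse_append, List.reverse_singleton, List.singleton_append] at h'
    rw [List.cons_prefix_cons] at h'
    exact ⟨List.reverse_prefix.mp h'.2, h'.1⟩
  · rintro ⟨⟨u, rfl⟩, rfl⟩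
    exact ⟨u, by simp⟩

theorem pv_take_succ_suffix (gt p : List Int) (t : Int) (kn : Nat) (h : kn < gt.length) :
    gt.take (kn + 1) <:+ p ++ [t] ↔ gt.take kn <:+ p ∧ gt[kn] = t := by
  rw [List.take_succ, List.getElem?_eq_getElem h]
  simp only [Option.toList_some]
  exact pv_suffix_concat _ _ _ _

theorem pv_fold_mem (gt : List Int) (m : Int) (active : PySem.Set Int) (t k : Int) :
    k ∈ pvFold gt m active t ↔
      ∃ k' ∈ active, (decide (k' < m) && (PySem.List.pyGet? gt k' == some t)) = true ∧ k = k' + 1 := by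
  have h := pv_mem_foldl_add
    (fun k' => decide (k' < m) && (PySem.List.pyGet? gt k' == some t)) active PySem.Set.empty k
  simpa [pvFold, PySem.Set.empty] using h

theorem pv_step_mem (gt p : List Int) (t : Int) (active : PySem.Set Int)
    (hg : 1 ≤ gt.length) (hinv : ∀ k, k ∈ active ↔ pvP gt p k) (k : Int) :
    k ∈ pvBStep gt (gt.length : Int) active t ↔ pvP gt (p ++ [t]) k := by
  have key : (k ∈ pvFold gt (gt.length : Int) active t ∨
      ((PySem.List.pyGet? gt 0 == some t) = true ∧ k = 1)) ↔ pvP gt (p ++ [t]) k := by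
    constructor
    · rintro (hf | ⟨h0, rfl⟩)
      · obtain ⟨k', hk', hc, rfl⟩ := (pv_fold_mem gt _ active t k).mp hf
        obtain ⟨kn, rfl, h1, hle, hsuf⟩ := (hinv k').mp hk'
        simp only [Bool.and_eq_true, decide_eq_true_eq, beq_iff_eq] at hc
        have hlt : kn < gt.length := by exact_mod_cast hc.1
        have hget : gt[kn] = t := by
          have h2 := hc.2
          rw [PySem.List.pyGet?_natCast, List.getElem?_eq_getElem hlt] at h2
          exact Option.some.inj h2
        exact ⟨kn + 1, by push_cast; ring, by omega, by omega,
          (pv_take_succ_suffix gt p t kn hlt).mpr ⟨hsuf, hget⟩⟩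
      · have h0' : gt[0] = t := by
          rw [beq_iff_eq, PySem.List.pyGet?_zero, List.getElem?_eq_getElem (by omega)] at h0
          exact Option.some.inj h0
        exact ⟨1, by norm_num, le_refl 1, hg,
          (pv_take_succ_suffix gt p t 0 (by omega)).mpr ⟨by simp, h0'⟩⟩
    · rintro ⟨kn, rfl, h1, hle, hsuf⟩
      obtain ⟨j, rfl⟩ : ∃ j, kn = j + 1 := ⟨kn - 1, by omega⟩
      have hjlt : j < gt.length := by omega
      obtain ⟨hsp, hget⟩ := (pv_take_succ_suffix gt p t j hjlt).mp hsuf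
      by_cases hj : j = 0
      · subst hj
        refine Or.inr ⟨?_, by norm_num⟩
        rw [beq_iff_eq, PySem.List.pyGet?_zero, List.getElem?_eq_getElem (by omega), hget]
      · refine Or.inl ((pv_fold_mem gt _ active t _).mpr
          ⟨(j : Int), (hinv _).mpr ⟨j, rfl, by omega, by omega, hsp⟩, ?_, by push_cast; ring⟩)
        simp only [Bool.and_eq_true, decide_eq_true_eq, beq_iff_eq]
        exact ⟨by exact_mod_cast hjlt,
          by rw [PySem.List.pyGet?_natCast, List.getElem?_eq_getElem hjlt, hget]⟩
  unfold pvBStep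
  by_cases h0 : (PySem.List.pyGet? gt 0 == some t) = true
  · rw [if_pos h0, PySem.Set.mem_add _ _ _, ← key]
    constructor
    · rintro (hf | rfl)
      · exact Or.inl hf
      · exact Or.inr ⟨h0, rfl⟩
    · rintro (hf | ⟨-, rfl⟩)
      · exact Or.inl hf
      · exact Or.inr rfl
  · rw [if_neg h0, ← key]
    constructor
    · exact Or.inl
    · rintro (hf | ⟨h0', -⟩)
      · exact hf
      · exact absurd h0' h0

theorem pv_loop_iff (gt : List Int) (hg : 1 ≤ gt.length) :
    ∀ (rest p : List Int) (active : PySem.Set Int),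
      (∀ k, k ∈ active ↔ pvP gt p k) →
      (pvBLoop gt (gt.length : Int) active rest = true ↔
        ∃ q, q <+: rest ∧ q ≠ [] ∧ gt <:+ p ++ q) := by
  intro rest
  induction rest with
  | nil =>
    intro p active hinv
    simp only [pvBLoop, Bool.false_eq_true, false_iff]
    rintro ⟨q, hq, hne, -⟩
    exact hne (List.prefix_nil.mp hq)
  | cons t rest ih =>
    intro p active hinv
    have hstep := pv_step_mem gt p t active hg hinv
    simp only [pvBLoop]
    by_cases hm : PySem.Set.contains (pvBStep gt (gt.length : Int) active t) (gt.length : Int) = true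
    · rw [if_pos hm]
      have hmem : ((gt.length : Int)) ∈ pvBStep gt (gt.length : Int) active t := by
        simpa [PySem.Set.contains] using hm
      obtain ⟨kn, hcast, h1, hle, hsuf⟩ := (hstep _).mp hmem
      have hkn : kn = gt.length := by exact_mod_cast hcast.symm
      subst hkn
      rw [List.take_length] at hsuf
      exact iff_of_true rfl ⟨[t], ⟨rest, rfl⟩, by simp, hsuf⟩
    · rw [if_neg hm, ih (p ++ [t]) _ hstep]
      constructor
      · rintro ⟨q, hq, -, hsuf⟩
        exact ⟨t :: q, by simpa [List.cons_prefix_cons] using hq, by simp,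
          by simpa [List.append_assoc] using hsuf⟩
      · rintro ⟨q, hq, hne, hsuf⟩
        rcases q with _ | ⟨t', q'⟩
        · exact absurd rfl hne
        · obtain ⟨heq, hq'⟩ := List.cons_prefix_cons.mp hq
          rw [heq] at hsuf
          rcases eq_or_ne q' [] with rfl | hq'ne
          · exfalso
            apply hm
            have hP : pvP gt (p ++ [t]) (gt.length : Int) :=
              ⟨gt.length, rfl, hg, le_refl _, by simpa using hsuf⟩
            simpa [PySem.Set.contains] using (hstep _).mpr hP
          · exact ⟨q', hq', hq'ne, by simpa [List.append_assoc] using hsuf⟩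

theorem pv_alt_iff (w g : List Int) :
    is_subsequence_in_window_alt w g = true ↔ 1 ≤ g.length ∧ g <:+: w := by
  unfold is_subsequence_in_window_alt
  by_cases h0 : g.length = 0
  · rw [if_pos (by simp [h0])]
    simp [h0]
  · have hg : 1 ≤ g.length := by omega
    rw [if_neg (by simp [h0])]
    have hinv : ∀ k, k ∈ (PySem.Set.empty : PySem.Set Int) ↔ pvP g [] k := by
      intro k
      constructor
      · intro h; exact absurd h (by simp [PySem.Set.empty])
      · rintro ⟨kn, rfl, h1, hle, hsuf⟩
        have hnil : g.take kn = [] := List.suffix_nil.mp hsuf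
        have hlen := congrArg List.length hnil
        simp only [List.length_take, List.length_nil] at hlen
        omega
    rw [pv_loop_iff g hg w [] PySem.Set.empty hinv]
    constructor
    · rintro ⟨q, hq, -, hsuf⟩
      rw [List.nil_append] at hsuf
      exact ⟨hg, hsuf.isInfix.trans hq.isInfix⟩
    · rintro ⟨-, s, tl, rfl⟩
      refine ⟨s ++ g, ⟨tl, by simp⟩, ?_, by simpa using List.suffix_append s g⟩
      apply List.ne_nil_of_length_pos
      simp only [List.length_append]
      omega

theorem pv_a_iff (w g : List Int) :
    is_subsequence_in_window w g = true ↔ 1 ≤ g.length ∧ g <:+: w := by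
  unfold is_subsequence_in_window
  by_cases hguard : (g.length : Int) = 0 ∨ (g.length : Int) > (w.length : Int)
  · rw [if_pos hguard]
    simp only [Bool.false_eq_true, false_iff]
    rintro ⟨h1, hinf⟩
    have hle := hinf.length_le
    rcases hguard with h | h <;> omega
  · rw [if_neg hguard]
    push_neg at hguard
    obtain ⟨h0, hmn⟩ := hguard
    have hg : 1 ≤ g.length := by
      rcases Nat.eq_zero_or_pos g.length with h | h
      · exact absurd (by exact_mod_cast h) h0
      · omega
    rw [List.any_eq_true]
    constructor
    · rintro ⟨i, hi, hslice⟩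
      rw [PySem.List.mem_pyRange_one] at hi
      obtain ⟨hi0, hilt⟩ := hi
      rw [beq_iff_eq] at hslice
      obtain ⟨iN, rfl⟩ : ∃ iN : Nat, i = (iN : Int) := ⟨i.toNat, (Int.toNat_of_nonneg hi0).symm⟩
      rw [show ((iN : Int) + (g.length : Int)) = ((iN + g.length : Nat) : Int) by push_cast; ring,
        PySem.List.slice_natCast, Nat.add_sub_cancel_left] at hslice
      refine ⟨hg, ?_⟩
      rw [← hslice]
      exact (List.take_prefix g.length (w.drop iN)).isInfix.trans (List.drop_suffix iN w).isInfix
    · rintro ⟨-, s, tl, rfl⟩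
      refine ⟨(s.length : Int), ?_, ?_⟩
      · rw [PySem.List.mem_pyRange_one]
        refine ⟨by exact_mod_cast s.length.zero_le, ?_⟩
        simp only [List.length_append]
        push_cast
        omega
      · rw [beq_iff_eq,
          show ((s.length : Int) + (g.length : Int)) = ((s.length + g.length : Nat) : Int) by push_cast; ring,
          PySem.List.slice_natCast, Nat.add_sub_cancel_left, List.append_assoc, List.drop_left,
          List.take_left]

-- ===== VERDICT (by name: the statement is the Claim_ definition above) =====
theorem is_subsequence_in_window_spec : Claim_equal_is_subsequence_in_window := by
  intro w g _
  unfold Spec_is_subsequence_in_window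
  have h := (pv_a_iff w g).trans (pv_alt_iff w g).symm
  cases hA : is_subsequence_in_window w g <;> cases hB : is_subsequence_in_window_alt w g <;>
    simp_all
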